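-- pv_equiv track=rewrite | github.com/Shakalniy/My-RSA-Implementation | check_key.py | viner_attack
-- ===== SOURCE A (Python) =====
-- import math
--
-- def equation(a, b, c):
--     discr = b ** 2 - 4 * a * c
--
--     if discr > 0:
--         x1 = (-b + math.isqrt(discr)) // (2 * a)
--         x2 = (-b - math.isqrt(discr)) // (2 * a)
--         return [int(x1), int(x2)]
--     else:
--         return False
--
-- def viner_attack(e, n):
--     a, q = divmod(e, n)  # целая и дробная части
--     t = n
--     res = [a]
--     while q != 0:
--         next_t = q
--         a, q = divmod(t, q)
--         t = next_t
--         res.append(a)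
--
--     fractions = [[0, 1], [1, res[1]]]
--     for i in range(2, len(res)):
--         numerator = fractions[i - 2][0] + fractions[i - 1][0] * res[i]
--         denominator = fractions[i - 2][1] + fractions[i - 1][1] * res[i]
--         fractions.append([numerator, denominator])
--
--     for i in range(1, len(fractions)):
--         k, d = fractions[i][0], fractions[i][1]
--         phi_n = (e * d - 1) // k
--         b = -(n - phi_n + 1)
--         roots = equation(1, b, n)
--         if roots:
--             pr = roots[0] * roots[1]
--             if pr == n:
--                 return True
--
--     return False
-- ===== SOURCE B (Python) =====
-- import math
--
--
-- def viner_attack(e, n):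
--     # One streaming pass: Euclidean quotients of (e, n) drive two rolling
--     # convergent pairs; each convergent is tested immediately -- no res /
--     # fractions lists are ever materialized.
--     q = e % n
--     a, r = divmod(n, q)
--     k_prev, d_prev = 0, 1
--     k, d = 1, a
--     t, q = q, r
--     while True:
--         phi = (e * d - 1) // k
--         b = -(n - phi + 1)
--         disc = b * b - 4 * n
--         if disc > 0:
--             s = math.isqrt(disc)
--             x1 = (-b + s) // 2
--             x2 = (-b - s) // 2
--             if x1 * x2 == n:
--                 return True
--         if q == 0:
--             return False
--         a, r = divmod(t, q)
--         k_prev, k = k, k_prev + k * a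
--         d_prev, d = d, d_prev + d * a
--         t, q = q, r
-- ===== Notes on version B (the rewrite author's own statement) =====
-- stated objective: alternative
-- what changed: A's three phases (materialize the full continued-fraction quotient list, build the whole convergents table by indexed appends, then a separate indexed search loop) are fused into a single streaming Euclidean loop that keeps only two rolling convergent pairs and tests each convergent the moment its quotient appears, never building res or fractions.
import Mathlib
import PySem

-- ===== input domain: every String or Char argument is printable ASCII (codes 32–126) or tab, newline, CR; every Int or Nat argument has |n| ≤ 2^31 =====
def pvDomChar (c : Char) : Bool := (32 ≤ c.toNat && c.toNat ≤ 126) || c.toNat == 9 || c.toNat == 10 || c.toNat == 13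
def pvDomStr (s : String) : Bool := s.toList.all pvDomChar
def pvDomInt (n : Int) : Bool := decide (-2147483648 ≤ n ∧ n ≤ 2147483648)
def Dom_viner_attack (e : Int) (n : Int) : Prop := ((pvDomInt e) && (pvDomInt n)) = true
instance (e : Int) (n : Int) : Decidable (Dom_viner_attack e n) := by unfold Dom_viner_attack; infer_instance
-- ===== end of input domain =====

-- B fuses A's three phases (quotient list, convergent table, search loop) into one
-- streaming Euclidean loop with two rolling convergent pairs (objective: alternative).

-- termination measure for the Euclidean recursions (cited by decreasing_by)
theorem pvModNatAbsLt (t q : Int) (h : q ≠ 0) :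
    (PySem.Int.mod t q).natAbs < q.natAbs := by
  rcases lt_or_gt_of_ne h with hneg | hpos
  · have := PySem.Int.mod_neg_bounds t hneg
    omega
  · have h1 := PySem.Int.mod_nonneg t hpos
    have h2 := PySem.Int.mod_lt t hpos
    omega

-- ===== PORT A =====
-- equation(a,b,c): 'False' = none, the two-root list = some pair
def pvEquation (a b c : Int) : Option (Int × Int) :=
  let discr := b ^ 2 - 4 * a * c
  if discr > 0 then
    some (PySem.Int.floordiv (-b + Int.sqrt discr) (2 * a),
          PySem.Int.floordiv (-b - Int.sqrt discr) (2 * a))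
  else none

-- the 'while q != 0' loop of A, appending quotients to res
def pvCf (t q : Int) : List Int :=
  if h : q = 0 then []
  else PySem.Int.floordiv t q :: pvCf q (PySem.Int.mod t q)
termination_by q.natAbs
decreasing_by exact pvModNatAbsLt t q h

-- one step of A's fractions-building for loop (index i into res / fractions)
def pvFracStep (res : List Int) (fr : List (Int × Int)) (i : Int) : List (Int × Int) :=
  let f2 := PySem.List.pyGetD fr (i - 2) (0, 0)
  let f1 := PySem.List.pyGetD fr (i - 1) (0, 0)
  let ri := PySem.List.pyGetD res i 0
  fr ++ [(f2.1 + f1.1 * ri, f2.2 + f1.2 * ri)]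

-- body of A's search loop: equation, truthiness test, product test
def pvTestA (e n k d : Int) : Bool :=
  let phi := PySem.Int.floordiv (e * d - 1) k
  let b := -(n - phi + 1)
  match pvEquation 1 b n with
  | some (x1, x2) => x1 * x2 == n
  | none => false

-- A's 'for i in range(1, len(fractions))' with early return True
def pvSearch (fr : List (Int × Int)) (e n : Int) : List Int → Bool
  | [] => false
  | i :: rest =>
    let kd := PySem.List.pyGetD fr i (0, 0)
    if pvTestA e n kd.1 kd.2 then true else pvSearch fr e n rest

def viner_attack (e : Int) (n : Int) : Bool :=
  let a := PySem.Int.floordiv e n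
  let q := PySem.Int.mod e n
  let res := a :: pvCf n q
  -- res[1] : IndexError (excluded by Pre_) ported as a junk default
  let r1 := PySem.List.pyGetD res 1 0
  let fractions :=
    (PySem.List.pyRange 2 (res.length : Int) 1).foldl (pvFracStep res) [(0, 1), (1, r1)]
  pvSearch fractions e n (PySem.List.pyRange 1 (fractions.length : Int) 1)

-- ===== PORT B =====
-- the convergent test, inlined quadratic included (Source B loop body, top part)
def pvTestB (e n k d : Int) : Bool :=
  let phi := PySem.Int.floordiv (e * d - 1) k
  let b := -(n - phi + 1)
  let disc := b * b - 4 * n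
  if disc > 0 then
    let s := Int.sqrt disc
    let x1 := PySem.Int.floordiv (-b + s) 2
    let x2 := PySem.Int.floordiv (-b - s) 2
    x1 * x2 == n
  else false

-- Source B's single 'while True' loop: test, stop on q == 0, advance rolling state
def pvAltLoop (e n t q kp dp k d : Int) : Bool :=
  if pvTestB e n k d then true
  else if h : q = 0 then false
  else
    let a := PySem.Int.floordiv t q
    let r := PySem.Int.mod t q
    pvAltLoop e n q r k d (kp + k * a) (dp + d * a)
termination_by q.natAbs
decreasing_by exact pvModNatAbsLt t q h

def viner_attack_alt (e : Int) (n : Int) : Bool :=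
  let q := PySem.Int.mod e n
  let a := PySem.Int.floordiv n q
  let r := PySem.Int.mod n q
  pvAltLoop e n q r 0 1 1 a

-- ===== PRECONDITION & SPEC =====
-- Pre_ excludes exactly the crashes: n = 0 (ZeroDivisionError in divmod) and
-- e % n == 0 (A's res has one element, res[1] raises IndexError).
def Pre_viner_attack (e : Int) (n : Int) : Prop := n ≠ 0 ∧ PySem.Int.mod e n ≠ 0
instance (e : Int) (n : Int) : Decidable (Pre_viner_attack e n) := by
  unfold Pre_viner_attack; infer_instance

def pvWitness_viner_attack : Int × Int := (17, 5)

def Spec_viner_attack (e : Int) (n : Int) (out : Bool) : Prop := out = viner_attack_alt e n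
instance (e : Int) (n : Int) (out : Bool) : Decidable (Spec_viner_attack e n out) := by
  unfold Spec_viner_attack; infer_instance

-- ===== CLAIM (what is proved, stated in full; the proofs are below) =====
def Claim_equal_viner_attack : Prop :=
  ∀ (e : Int) (n : Int), Dom_viner_attack e n → Pre_viner_attack e n →
    Spec_viner_attack e n (viner_attack e n)

-- ===== LEMMAS AND PROOFS =====

-- the convergents after the first, built structurally from the quotient tail
def pvConvTail (p c : Int × Int) : List Int → List (Int × Int)
  | [] => []
  | a :: as =>
    let c' := (p.1 + c.1 * a, p.2 + c.2 * a)
    c' :: pvConvTail c c' as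

theorem pvTestAB (e n k d : Int) : pvTestA e n k d = pvTestB e n k d := by
  simp only [pvTestA, pvTestB, pvEquation]
  set b := -(n - PySem.Int.floordiv (e * d - 1) k + 1) with hb
  have h1 : b ^ 2 - 4 * 1 * n = b * b - 4 * n := by ring
  rw [h1]
  by_cases hd : b * b - 4 * n > 0
  · simp only [if_pos hd, mul_one]
  · simp only [if_neg hd]

-- B's loop computes the any-test over the rolling convergents of pvCf t q
theorem pvAltLoop_eq (e n : Int) :
    ∀ (t q kp dp k d : Int),
      pvAltLoop e n t q kp dp k d
        = (((k, d) :: pvConvTail (kp, dp) (k, d) (pvCf t q)).any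
            fun kd => pvTestB e n kd.1 kd.2) := by
  intro t q
  induction t, q using pvCf.induct with
  | case1 t =>
    intro kp dp k d
    rw [pvAltLoop, pvCf]
    simp [pvConvTail]
  | case2 t q hq ih =>
    intro kp dp k d
    rw [pvAltLoop, pvCf]
    rw [dif_neg hq, dif_neg hq]
    by_cases ht : pvTestB e n k d
    · simp [ht]
    · simp only [ht]
      rw [ih]
      simp [pvConvTail, ht]

-- A's search loop over range(s, len(fr)) is any-test over fr.drop s
theorem pvSearch_eq (fr : List (Int × Int)) (e n : Int) :
    ∀ (tail : List (Int × Int)) (s : Nat), fr.drop s = tail →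
      pvSearch fr e n (PySem.List.pyRange (s : Int) (fr.length : Int) 1)
        = tail.any fun kd => pvTestA e n kd.1 kd.2 := by
  intro tail
  induction tail with
  | nil =>
    intro s hs
    have hlen : fr.length ≤ s := by
      by_contra hlt
      rw [List.drop_eq_nil_iff] at hs
      omega
    rw [PySem.List.pyRange_one_eq_nil (by exact_mod_cast hlen)]
    simp [pvSearch]
  | cons x xs ih =>
    intro s hs
    have hslt : s < fr.length := by
      by_contra hge
      rw [List.drop_eq_nil_of_le (by omega)] at hs
      simp at hs
    have hx : fr[s]? = some x := by
      have h0 : (fr.drop s)[0]? = some x := by rw [hs]; rfl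
      rwa [List.getElem?_drop, Nat.add_zero] at h0
    rw [PySem.List.pyRange_one_cons (by exact_mod_cast hslt)]
    rw [pvSearch]
    have hget : PySem.List.pyGetD fr (s : Int) (0, 0) = x := by
      rw [PySem.List.pyGetD_natCast]
      simp [List.getD, hx]
    rw [hget]
    have hdrop : fr.drop (s + 1) = xs := by
      have h1 : (fr.drop s).drop 1 = fr.drop (s + 1) := List.drop_drop
      rw [← h1, hs]
      rfl
    have hcast : (s : Int) + 1 = ((s + 1 : Nat) : Int) := by push_cast; ring
    rw [hcast, ih (s + 1) hdrop]
    by_cases ht : pvTestA e n x.1 x.2 <;> simp [ht]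

-- A's fractions fold materializes pvConvTail behind the seed [p, c]
theorem pvFracFold (res : List Int) :
    ∀ (as : List Int) (pref : List (Int × Int)) (p c : Int × Int),
      (∀ j : Nat, j < as.length →
        PySem.List.pyGetD res ((pref.length : Int) + 2 + (j : Int)) 0 = as.getD j 0) →
      List.foldl (pvFracStep res) (pref ++ [p, c])
        (PySem.List.pyRange ((pref.length : Int) + 2)
          ((pref.length : Int) + 2 + (as.length : Int)) 1)
      = (pref ++ [p, c]) ++ pvConvTail p c as := by
  intro as
  induction as with
  | nil =>
    intro pref p c _
    rw [PySem.List.pyRange_one_eq_nil (by simp)]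
    simp [pvConvTail]
  | cons a as ih =>
    intro pref p c h
    have hlen : ((pref.length : Int) + 2) < (pref.length : Int) + 2 + ((a :: as).length : Int) := by
      simp
    rw [PySem.List.pyRange_one_cons hlen]
    rw [List.foldl_cons]
    have hstep : pvFracStep res (pref ++ [p, c]) ((pref.length : Int) + 2)
        = (pref ++ [p]) ++ [c, (p.1 + c.1 * a, p.2 + c.2 * a)] := by
      unfold pvFracStep
      have h2 : PySem.List.pyGetD (pref ++ [p, c]) ((pref.length : Int) + 2 - 2) (0, 0) = p := by
        have : (pref.length : Int) + 2 - 2 = ((pref.length : Nat) : Int) := by ring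
        rw [this, PySem.List.pyGetD_natCast]
        simp [List.getD]
      have h1 : PySem.List.pyGetD (pref ++ [p, c]) ((pref.length : Int) + 2 - 1) (0, 0) = c := by
        have : (pref.length : Int) + 2 - 1 = ((pref.length + 1 : Nat) : Int) := by push_cast; ring
        rw [this, PySem.List.pyGetD_natCast]
        simp [List.getD]
      have hr : PySem.List.pyGetD res ((pref.length : Int) + 2) 0 = a := by
        have := h 0 (by simp)
        simpa using this
      rw [h2, h1, hr]
      simp
    rw [hstep]
    have harith1 : (pref.length : Int) + 2 + 1 = (((pref ++ [p]).length : Nat) : Int) + 2 := by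
      simp; push_cast; ring
    have harith2 : (pref.length : Int) + 2 + ((a :: as).length : Int)
        = (((pref ++ [p]).length : Nat) : Int) + 2 + (as.length : Int) := by
      simp; push_cast; ring
    rw [harith1, harith2]
    rw [ih (pref ++ [p]) c (p.1 + c.1 * a, p.2 + c.2 * a) ?_]
    · simp [pvConvTail]
    · intro j hj
      have := h (j + 1) (by simp; omega)
      have harith3 : (((pref ++ [p]).length : Nat) : Int) + 2 + (j : Int)
          = (pref.length : Int) + 2 + ((j + 1 : Nat) : Int) := by
        simp; omega
      rw [harith3, this]
      simp [List.getD]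

-- ===== VERDICT (by name: the statement is the Claim_ definition above) =====
theorem viner_attack_spec : Claim_equal_viner_attack := by
  intro e n _ hpre
  obtain ⟨hn, hq⟩ := hpre
  unfold Spec_viner_attack
  simp only [viner_attack, viner_attack_alt]
  have hcf : pvCf n (PySem.Int.mod e n)
      = PySem.Int.floordiv n (PySem.Int.mod e n)
        :: pvCf (PySem.Int.mod e n) (PySem.Int.mod n (PySem.Int.mod e n)) := by
    rw [pvCf, dif_neg hq]
  rw [hcf]
  set a0 := PySem.Int.floordiv e n with ha0
  set a1 := PySem.Int.floordiv n (PySem.Int.mod e n) with ha1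
  set rest := pvCf (PySem.Int.mod e n) (PySem.Int.mod n (PySem.Int.mod e n)) with hrest
  have hr1 : PySem.List.pyGetD (a0 :: a1 :: rest) (1 : Int) 0 = a1 := by
    rw [show (1 : Int) = ((1 : Nat) : Int) by norm_num, PySem.List.pyGetD_natCast]
    rfl
  rw [hr1]
  have hidx : ∀ j : Nat, j < rest.length →
      PySem.List.pyGetD (a0 :: a1 :: rest) ((([] : List (Int × Int)).length : Int) + 2 + (j : Int)) 0
        = rest.getD j 0 := by
    intro j hj
    rw [show ((([] : List (Int × Int)).length : Int) + 2 + (j : Int)) = ((j + 2 : Nat) : Int) by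
      simp; omega, PySem.List.pyGetD_natCast]
    simp [List.getD]
  have hfold := pvFracFold (a0 :: a1 :: rest) rest [] (0, 1) (1, a1) hidx
  simp only [List.length_nil, Nat.cast_zero, zero_add, List.nil_append] at hfold
  have hlen : (((a0 :: a1 :: rest).length : Nat) : Int) = 2 + (rest.length : Int) := by
    simp; omega
  rw [hlen, hfold]
  have hsearch := pvSearch_eq ([(0, 1), (1, a1)] ++ pvConvTail (0, 1) (1, a1) rest) e n
    ((1, a1) :: pvConvTail (0, 1) (1, a1) rest) 1 rfl
  simp only [Nat.cast_one] at hsearch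
  rw [hsearch]
  rw [pvAltLoop_eq]
  have hfun : (fun kd : Int × Int => pvTestA e n kd.1 kd.2)
      = fun kd : Int × Int => pvTestB e n kd.1 kd.2 := by
    funext kd; exact pvTestAB e n kd.1 kd.2
  rw [hfun]
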